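-- pv_equiv track=rewrite | github.com/AUDRIC-1/nyc-taxi-analytics | backend.py | manual_top_n_sort
-- ===== SOURCE A (Python) =====
-- def manual_top_n_sort(items, n=5):
--     """
--     CUSTOM ALGORITHM: Manual implementation of top-N sorting
--     No built-in sorting functions used - demonstrates algorithmic thinking
--     """
--     # Manual selection sort for top N elements
--     results = []
--     data = items.copy()
--
--     for i in range(min(n, len(data))):
--         max_index = i
--         for j in range(i + 1, len(data)):
--             if data[j] > data[max_index]:
--                 max_index = j
--
--         # Swap elements manually
--         data[i], data[max_index] = data[max_index], data[i]
--         results.append(data[i])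
--
--     return results
-- ===== SOURCE B (Python) =====
-- def manual_top_n_sort(items, n=5):
--     """Same top-N selection, done with one built-in descending sort and a slice
--     (A's manual selection passes removed); items is not mutated."""
--     if n <= 0:
--         return []
--     return sorted(items, reverse=True)[:n]
-- ===== Notes on version B (the rewrite author's own statement) =====
-- stated objective: faster
-- what changed: Replaces A's manual partial selection sort (N passes, each scanning the remaining list for its maximum and swapping) with a single built-in descending sort followed by a slice of the first n elements.
import Mathlib
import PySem

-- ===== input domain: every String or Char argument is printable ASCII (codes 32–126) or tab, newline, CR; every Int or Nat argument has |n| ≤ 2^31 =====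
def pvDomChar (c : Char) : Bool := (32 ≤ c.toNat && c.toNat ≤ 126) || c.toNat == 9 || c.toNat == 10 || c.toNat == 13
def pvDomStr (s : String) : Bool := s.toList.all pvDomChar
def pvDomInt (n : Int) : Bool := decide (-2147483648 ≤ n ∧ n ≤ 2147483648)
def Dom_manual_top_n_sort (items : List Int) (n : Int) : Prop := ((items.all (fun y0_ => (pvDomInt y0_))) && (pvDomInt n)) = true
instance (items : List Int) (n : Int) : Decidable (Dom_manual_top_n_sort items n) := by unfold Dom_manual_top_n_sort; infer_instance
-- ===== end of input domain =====

-- B replaces A's manual partial selection sort by one built-in descending sort plus a slice (same values; neither mutates items).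


-- ===== PORT A =====
-- literal port of A: data = items.copy(); for i in range(min(n, len(data))): inner argmax scan, swap, append data[i]
def manual_top_n_sort (items : List Int) (n : Int) : List Int :=
  (((List.range (min n (items.length : Int)).toNat).foldl
    (fun (st : List Int × List Int) (i : Nat) =>
      let data := st.1
      let m := (List.range' (i + 1) (data.length - (i + 1))).foldl
        (fun mi j => if data.getD j 0 > data.getD mi 0 then j else mi) i
      let data' := (data.set i (data.getD m 0)).set m (data.getD i 0)
      (data', st.2 ++ [data'.getD i 0]))
    (items, [])).2)

-- ===== PORT B =====
-- literal port of B: if n <= 0: []; else sorted(items, reverse=True)[:n]  (take n.toNat is exact for n > 0)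
def manual_top_n_sort_alt (items : List Int) (n : Int) : List Int :=
  if n ≤ 0 then []
  else (PySem.List.sorted items (fun x => x) true).take n.toNat

-- ===== PRECONDITION & SPEC =====
def Spec_manual_top_n_sort (items : List Int) (n : Int) (out : List Int) : Prop := out = manual_top_n_sort_alt items n
instance (items : List Int) (n : Int) (out : List Int) : Decidable (Spec_manual_top_n_sort items n out) := by unfold Spec_manual_top_n_sort; infer_instance

-- ===== CLAIM (what is proved, stated in full; the proofs are below) =====
def Claim_equal_manual_top_n_sort : Prop := ∀ (items : List Int) (n : Int), Dom_manual_top_n_sort items n → Spec_manual_top_n_sort items n (manual_top_n_sort items n)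

-- ===== LEMMAS AND PROOFS =====

-- the body of A's outer loop, named for the proofs (definitionally the foldl body above)
def pvStep (st : List Int × List Int) (i : Nat) : List Int × List Int :=
  let data := st.1
  let m := (List.range' (i + 1) (data.length - (i + 1))).foldl
    (fun mi j => if data.getD j 0 > data.getD mi 0 then j else mi) i
  let data' := (data.set i (data.getD m 0)).set m (data.getD i 0)
  (data', st.2 ++ [data'.getD i 0])

lemma manual_eq_foldl (items : List Int) (n : Int) :
    manual_top_n_sort items n =
      ((List.range (min n (items.length : Int)).toNat).foldl pvStep (items, [])).2 := rfl

-- loop invariant after i outer iterations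
def pvInv (items : List Int) (i : Nat) (st : List Int × List Int) : Prop :=
  st.1.Perm items ∧ st.2 = st.1.take i ∧
  (st.1.take i).Pairwise (fun a b => b ≤ a) ∧
  (∀ a ∈ st.1.take i, ∀ b ∈ st.1.drop i, b ≤ a)

-- the inner scan returns an index in [lo, lo+c] (its seed or a scanned one) whose value dominates the seed and all scanned positions
lemma argmax_fold (data : List Int) : ∀ (c s mi : Nat),
    ((List.range' s c).foldl (fun mi j => if data.getD j 0 > data.getD mi 0 then j else mi) mi) = mi ∨
      (∃ t, t < c ∧ ((List.range' s c).foldl (fun mi j => if data.getD j 0 > data.getD mi 0 then j else mi) mi) = s + t) := by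
  intro c
  induction c with
  | zero => intro s mi; left; rfl
  | succ c ih =>
    intro s mi
    rw [List.range'_succ]
    simp only [List.foldl_cons]
    rcases ih (s + 1) (if data.getD s 0 > data.getD mi 0 then s else mi) with h | ⟨t, ht, h⟩
    · rw [h]; split
      · right; exact ⟨0, by omega, by omega⟩
      · left; rfl
    · right; exact ⟨t + 1, by omega, by omega⟩

lemma argmax_fold_ge (data : List Int) : ∀ (c s mi : Nat),
    data.getD mi 0 ≤ data.getD ((List.range' s c).foldl (fun mi j => if data.getD j 0 > data.getD mi 0 then j else mi) mi) 0 ∧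
    (∀ j, s ≤ j → j < s + c →
      data.getD j 0 ≤ data.getD ((List.range' s c).foldl (fun mi j => if data.getD j 0 > data.getD mi 0 then j else mi) mi) 0) := by
  intro c
  induction c with
  | zero => intro s mi; exact ⟨le_refl _, fun j h1 h2 => by omega⟩
  | succ c ih =>
    intro s mi
    rw [List.range'_succ]
    simp only [List.foldl_cons]
    obtain ⟨h1, h2⟩ := ih (s + 1) (if data.getD s 0 > data.getD mi 0 then s else mi)
    constructor
    · refine le_trans ?_ h1
      split <;> omega
    · intro j hj1 hj2
      by_cases hjs : j = s
      · subst hjs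
        refine le_trans ?_ h1
        split <;> omega
      · exact h2 j (by omega) (by omega)

-- one outer iteration preserves the invariant
lemma step_inv (items : List Int) (i : Nat) (st : List Int × List Int)
    (hlt : i < items.length) (hinv : pvInv items i st) :
    pvInv items (i + 1) (pvStep st i) := by
  obtain ⟨hperm, hres, hpair, hdom⟩ := hinv
  have hlen : st.1.length = items.length := hperm.length_eq
  set data := st.1 with hdata
  set m := (List.range' (i + 1) (data.length - (i + 1))).foldl
    (fun mi j => if data.getD j 0 > data.getD mi 0 then j else mi) i with hm
  have hmrange : i ≤ m ∧ m < data.length := by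
    rcases argmax_fold data (data.length - (i + 1)) (i + 1) i with h | ⟨t, ht, h⟩
    · rw [← hm] at h; omega
    · rw [← hm] at h; omega
  obtain ⟨him, hmlen⟩ := hmrange
  have hilen : i < data.length := by omega
  have hmax : ∀ j, i ≤ j → j < data.length → data.getD j 0 ≤ data.getD m 0 := by
    obtain ⟨h1, h2⟩ := argmax_fold_ge data (data.length - (i + 1)) (i + 1) i
    rw [← hm] at h1 h2
    intro j hj1 hj2
    by_cases hji : j = i
    · subst hji; exact h1
    · exact h2 j (by omega) (by omega)
  set data' := (data.set i (data.getD m 0)).set m (data.getD i 0) with hd'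
  have hlen' : data'.length = data.length := by simp [hd']
  have hgetDi : data.getD i 0 = data[i]'hilen := List.getD_eq_getElem data 0 hilen
  have hgetDm : data.getD m 0 = data[m]'hmlen := List.getD_eq_getElem data 0 hmlen
  -- pointwise description of the swap
  have hget' : ∀ j (h : j < data'.length),
      data'[j] = if m = j then data[i]'(by omega) else if i = j then data[m]'(by omega) else data[j]'(by omega) := by
    intro j h
    simp only [hd', List.getElem_set, hgetDi, hgetDm]
  have hperm' : data'.Perm data := by
    rw [hd', hgetDi, hgetDm]
    exact List.set_set_perm hilen hmlen
  -- the prefix below i is untouched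
  have htake : data'.take i = data.take i := by
    apply List.ext_getElem
    · simp [hlen']
    · intro j h1 h2
      have hj : j < i := by simp [hlen'] at h1; omega
      rw [List.getElem_take, List.getElem_take, hget']
      rw [if_neg (by omega), if_neg (by omega)]
  have hd'i : data'.getD i 0 = data.getD m 0 := by
    have hi' : i < data'.length := by omega
    rw [List.getD_eq_getElem data' 0 hi', hget' i hi', hgetDm]
    by_cases hmi : m = i
    · rw [if_pos hmi]; simp only [hmi]
    · rw [if_neg hmi, if_pos rfl]
  -- old elements at positions ≥ i lie in the old suffix and below the scanned maximum
  have hmemd : ∀ j (hj : j < data.length), i ≤ j → data[j] ∈ data.drop i ∧ data[j] ≤ data.getD m 0 := by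
    intro j hj hij
    constructor
    · rw [List.mem_iff_getElem]
      exact ⟨j - i, by simp; omega, by rw [List.getElem_drop]; congr 1; omega⟩
    · have := hmax j hij hj
      rw [List.getD_eq_getElem data 0 hj] at this
      exact this
  -- every element of the new suffix is some old element at a position ≥ i
  have hsuffix : ∀ b ∈ data'.drop (i + 1), b ∈ data.drop i ∧ b ≤ data.getD m 0 := by
    intro b hb
    rw [List.mem_iff_getElem] at hb
    obtain ⟨p, hp, hbp⟩ := hb
    rw [List.getElem_drop] at hbp
    have hip : i + 1 + p < data'.length := by simp at hp; omega
    rw [hget' _ hip] at hbp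
    subst hbp
    by_cases h1 : m = i + 1 + p
    · rw [if_pos h1]; exact hmemd i hilen (le_refl i)
    · rw [if_neg h1, if_neg (by omega)]; exact hmemd (i + 1 + p) (by omega) (by omega)
  have hmem_m : data.getD m 0 ∈ data.drop i := by
    rw [hgetDm]
    exact (hmemd m hmlen him).1
  have htake1 : data'.take (i + 1) = data.take i ++ [data.getD m 0] := by
    rw [List.take_succ_eq_append_getElem (by omega), htake]
    congr 1
    rw [← hd'i, List.getD_eq_getElem data' 0 (by omega)]
  refine ⟨hperm'.trans hperm, ?_, ?_, ?_⟩
  · show st.2 ++ [data'.getD i 0] = data'.take (i + 1)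
    rw [htake1, hres, hd'i]
  · show (data'.take (i + 1)).Pairwise _
    rw [htake1, List.pairwise_append]
    refine ⟨hpair, List.pairwise_singleton _ _, ?_⟩
    intro a ha b hb
    rw [List.mem_singleton] at hb
    subst hb
    exact hdom a ha _ hmem_m
  · show ∀ a ∈ data'.take (i + 1), ∀ b ∈ data'.drop (i + 1), b ≤ a
    intro a ha b hb
    rw [htake1, List.mem_append] at ha
    rcases ha with ha | ha
    · exact hdom a ha b (hsuffix b hb).1
    · rw [List.mem_singleton] at ha
      subst ha
      exact (hsuffix b hb).2

lemma inv_fold (items : List Int) : ∀ (i : Nat), i ≤ items.length →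
    pvInv items i ((List.range i).foldl pvStep (items, [])) := by
  intro i
  induction i with
  | zero =>
    intro _
    exact ⟨List.Perm.refl _, rfl, List.Pairwise.nil, by simp⟩
  | succ i ih =>
    intro h
    rw [List.range_succ, List.foldl_append, List.foldl_cons, List.foldl_nil]
    exact step_inv items i _ (by omega) (ih (by omega))

-- a ≥-ordered rearrangement of xs IS sorted(xs, reverse=True) (identity key; ties are equal values)
lemma sorted_rev_eq_of_perm_of_pairwise_ge (xs ys : List Int)
    (h : ys.Perm xs) (hp : ys.Pairwise (fun a b => b ≤ a)) :
    PySem.List.sorted xs (fun x => x) true = ys := by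
  refine List.Perm.eq_of_pairwise ?_ ?_ hp ((PySem.List.sorted_perm xs _ true).trans h.symm)
  · intro a b _ _ h1 h2; omega
  · have := PySem.List.sorted_pairwise_rev xs (fun x => x)
    simpa using this

-- the invariant at step k pins the result to the k-long descending-sorted prefix
lemma inv_final (items : List Int) (k : Nat) (st : List Int × List Int)
    (hk : k ≤ items.length) (hinv : pvInv items k st) :
    st.2 = (PySem.List.sorted items (fun x => x) true).take k := by
  obtain ⟨hperm, hres, hpair, hdom⟩ := hinv
  have hlen : st.1.length = items.length := hperm.length_eq
  have hlen_take : (st.1.take k).length = k := by simp; omega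
  have hsorted : PySem.List.sorted items (fun x => x) true =
      st.1.take k ++ PySem.List.sorted (st.1.drop k) (fun x => x) true := by
    apply sorted_rev_eq_of_perm_of_pairwise_ge
    · have h0 : (st.1.take k ++ PySem.List.sorted (st.1.drop k) (fun x => x) true).Perm
          (st.1.take k ++ st.1.drop k) :=
        List.Perm.append_left _ (PySem.List.sorted_perm _ _ _)
      rw [List.take_append_drop] at h0
      exact h0.trans hperm
    · rw [List.pairwise_append]
      refine ⟨hpair, ?_, ?_⟩
      · have := PySem.List.sorted_pairwise_rev (st.1.drop k) (fun x => x)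
        simpa using this
      · intro a ha b hb
        exact hdom a ha b ((PySem.List.mem_sorted _ _ _ _).mp hb)
  rw [hsorted, hres, List.take_append_of_le_length (by omega), List.take_take]
  simp

-- ===== VERDICT (by name: the statement is the Claim_ definition above) =====
theorem manual_top_n_sort_spec : Claim_equal_manual_top_n_sort := by
  intro items n _
  show manual_top_n_sort items n = manual_top_n_sort_alt items n
  rw [manual_eq_foldl]
  unfold manual_top_n_sort_alt
  set k : Nat := (min n (items.length : Int)).toNat with hk
  have hklen : k ≤ items.length := by omega
  have hfin := inv_final items k _ hklen (inv_fold items k hklen)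
  rw [hfin]
  by_cases hn : n ≤ 0
  · rw [if_pos hn]
    have : k = 0 := by omega
    simp [this]
  · rw [if_neg hn]
    have hlen : (PySem.List.sorted items (fun x => x) true).length = items.length :=
      PySem.List.length_sorted items _ true
    by_cases hcase : n ≤ (items.length : Int)
    · congr 1; omega
    · have h1 : k = items.length := by omega
      rw [h1, List.take_of_length_le (by omega), List.take_of_length_le (by omega)]
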